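-- pv_equiv track=rewrite | github.com/Dusk145/PTIT---Python | PY01027 - SO LOC PHAT DEP.py | check
-- ===== SOURCE A (Python) =====
-- def check(n):
--     idx = 0
--     while idx < len(n):
--         if idx + 3 <= len(n) and n[idx: idx + 3] == "688":
--             idx += 3
--         elif idx + 2 <= len(n) and n[idx: idx + 2] == "68":
--             idx += 2
--         elif n[idx] == "6":
--             idx += 1
--         else:
--             return False
--     return True
-- ===== SOURCE B (Python) =====
-- def check(n):
--     started = False
--     run = 0
--     for c in n:
--         if c == '6':
--             started = True
--             run = 0
--         elif c == '8':
--             if not started or run >= 2: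
--                 return False
--             run += 1
--         else:
--             return False
--     return True
-- ===== Notes on version B (the rewrite author's own statement) =====
-- stated objective: simpler
-- what changed: Replaced the greedy tile matcher (index + string slices compared against '688'/'68') by a single character-by-character state machine keeping a run-length counter of consecutive '8's and a started flag; no slicing or lookahead.
import Mathlib
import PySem

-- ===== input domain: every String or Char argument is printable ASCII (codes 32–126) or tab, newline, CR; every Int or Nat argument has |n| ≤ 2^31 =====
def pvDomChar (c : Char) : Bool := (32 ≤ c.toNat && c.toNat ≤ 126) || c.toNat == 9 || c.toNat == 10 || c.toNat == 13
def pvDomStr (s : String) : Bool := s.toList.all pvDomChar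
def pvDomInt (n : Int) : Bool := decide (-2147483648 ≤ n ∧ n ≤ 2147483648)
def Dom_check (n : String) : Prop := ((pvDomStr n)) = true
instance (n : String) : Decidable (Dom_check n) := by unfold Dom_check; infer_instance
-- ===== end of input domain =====

-- B replaces A's greedy tile matcher (index + slice comparisons) by a single
-- character state machine with a run-length counter of '8's — simpler, no slicing.

-- ===== PORT A =====
-- A's while loop with index and slices becomes structural recursion on the remaining
-- suffix; the slice comparisons n[idx:idx+3] == "688", n[idx:idx+2] == "68", n[idx] == "6"
-- (each exact: the slice equals that string iff the suffix starts with those chars)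
-- become the match arms, in A's branch order; [] => true is the normal loop exit.
def checkAux : List Char → Bool
  | '6' :: '8' :: '8' :: rest => checkAux rest
  | '6' :: '8' :: rest => checkAux rest
  | '6' :: rest => checkAux rest
  | [] => true
  | _ => false

def check (n : String) : Bool := checkAux n.toList

-- ===== PORT B =====
-- state machine: `started` = a '6' has been seen, `run` = consecutive '8's since it;
-- the Python early `return False` becomes the false-valued arms.
def checkAltAux : List Char → Bool → Nat → Bool
  | [], _, _ => true
  | c :: rest, started, run =>
    if c = '6' then checkAltAux rest true 0
    else if c = '8' then
      if !started || 2 ≤ run then false else checkAltAux rest started (run + 1)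
    else false

def check_alt (n : String) : Bool := checkAltAux n.toList false 0

-- ===== PRECONDITION & SPEC =====
def Spec_check (n : String) (out : Bool) : Prop := out = check_alt n
instance (n : String) (out : Bool) : Decidable (Spec_check n out) := by unfold Spec_check; infer_instance

-- ===== CLAIM (what is proved, stated in full; the proofs are below) =====
def Claim_equal_check : Prop := ∀ (n : String), Dom_check n → Spec_check n (check n)

-- ===== LEMMAS AND PROOFS =====

-- state (true, 2) behaves like the initial state (false, 0): both reject a next '8'
theorem altAux_sat : ∀ (cs : List Char), checkAltAux cs true 2 = checkAltAux cs false 0 := by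
  intro cs
  cases cs with
  | nil => rfl
  | cons c rest =>
    by_cases h6 : c = '6' <;> by_cases h8 : c = '8' <;>
      simp [checkAltAux, h6, h8]

-- when the next char is not '8', any state behaves like the initial state
theorem altAux_not8 : ∀ (cs : List Char) (s : Bool) (r : Nat),
    (∀ c rest, cs = c :: rest → c ≠ '8') → checkAltAux cs s r = checkAltAux cs false 0 := by
  intro cs s r h
  cases cs with
  | nil => rfl
  | cons c rest =>
    have h8 : c ≠ '8' := h c rest rfl
    by_cases h6 : c = '6' <;> simp [checkAltAux, h6, h8]

theorem aux_eq : ∀ (cs : List Char), checkAux cs = checkAltAux cs false 0 := by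
  intro cs
  induction cs using checkAux.induct with
  | case1 rest ih =>
    simp [checkAux, checkAltAux, ih, altAux_sat]
  | case2 rest h ih =>
    have hne : ∀ c r, rest = c :: r → c ≠ '8' := by
      intro c r hr hc; subst hc; exact h r hr
    simp [checkAux, checkAltAux, ih, altAux_not8 rest true 1 hne]
  | case3 rest h1 h2 ih =>
    have hne : ∀ c r, rest = c :: r → c ≠ '8' := by
      intro c r hr hc; subst hc; exact h2 r hr
    simp [checkAux, checkAltAux, ih, altAux_not8 rest true 0 hne]
  | case4 => rfl
  | case5 t h1 h2 h3 h4 =>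
    cases t with
    | nil => exact absurd rfl h4
    | cons c rest =>
      have h6 : c ≠ '6' := by intro hc; subst hc; exact h3 rest rfl
      by_cases h8 : c = '8' <;> simp [checkAux, checkAltAux, h6, h8]

-- ===== VERDICT (by name: the statement is the Claim_ definition above) =====
theorem check_spec : Claim_equal_check := by
  intro n _
  unfold Spec_check check check_alt
  exact aux_eq n.toList
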